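-- pv_equiv track=rewrite | github.com/ofekber/AI-Course | HW1/Example_Code.py | brotForce
-- ===== SOURCE A (Python) =====
-- import itertools
--
-- def brotForce(x, y):
--     """
--     Divide numbers from 0 to x into y groups and return all possible groupings.
--
--     :param x: The maximum number in the range (0 to x).
--     :param y: The number of groups.
--     :return: A list of all possible groupings.
--     """
--     numbers = list(range(x))
--
--     # Generate all possible partitions where numbers are used exactly once
--     def partitions(numbers, y):
--         # Generate all assignments of numbers to groups
--         for assignment in itertools.product(range(y), repeat=len(numbers)):
--             groups = [[] for _ in range(y)]
--             for number, group in zip(numbers, assignment):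
--                 groups[group].append(number)
--             yield groups
--
--     # Generate and return all possible groupings
--     results = [grouping for grouping in partitions(numbers, y)]
--     return results
-- ===== SOURCE B (Python) =====
-- def brotForce(x, y):
--     """
--     Divide numbers from 0 to x into y groups and return all possible groupings.
--     Iterative construction: start with one empty grouping and, for each number,
--     replace every partial grouping with y copies, appending the number to group
--     0..y-1 respectively (last number varies fastest).
--     """
--     results = [[[] for _ in range(y)]]
--     for i in range(x):
--         results = [g[:j] + [g[j] + [i]] + g[j + 1:]
--                    for g in results
--                    for j in range(y)]
--     return results
-- ===== Notes on version B (the rewrite author's own statement) =====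
-- stated objective: alternative
-- what changed: Replaces itertools.product over group indices plus a per-assignment group-building pass by a direct iterative construction that expands each partial grouping number by number, appending the number to each of the y groups in turn (same last-varies-fastest order).
import Mathlib
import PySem

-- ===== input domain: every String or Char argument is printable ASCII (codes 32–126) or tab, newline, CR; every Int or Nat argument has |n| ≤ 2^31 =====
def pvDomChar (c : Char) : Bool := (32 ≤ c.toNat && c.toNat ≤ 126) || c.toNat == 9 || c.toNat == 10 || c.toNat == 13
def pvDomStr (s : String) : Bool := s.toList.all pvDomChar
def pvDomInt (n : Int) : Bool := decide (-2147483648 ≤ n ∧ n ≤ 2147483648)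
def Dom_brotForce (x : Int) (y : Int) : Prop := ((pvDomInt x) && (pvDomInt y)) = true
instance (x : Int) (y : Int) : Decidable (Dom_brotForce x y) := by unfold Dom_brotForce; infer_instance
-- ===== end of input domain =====

-- B replaces itertools.product + per-assignment group building by a direct iterative
-- construction that expands partial groupings number by number (objective: alternative/simpler).


-- ===== PORT A =====
-- itertools.product(range(y), repeat=n): leftmost position varies slowest.
def pvProdRep (y : Int) (n : Nat) : List (List Int) :=
  match n with
  | 0 => [[]]
  | k + 1 => (PySem.List.pyRange 0 y 1).flatMap (fun v => (pvProdRep y k).map (fun rest => v :: rest))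

-- groups = [[] for _ in range(y)]; for number, group in zip(numbers, assignment): groups[group].append(number)
-- (group comes from range(y), so it is a valid nonnegative index: .toNat is exact here)
def pvBuildGroups (y : Int) (numbers : List Int) (assignment : List Int) : List (List Int) :=
  (numbers.zip assignment).foldl
    (fun groups p => groups.modify p.2.toNat (fun g => g ++ [p.1]))
    (List.replicate y.toNat [])

def brotForce (x : Int) (y : Int) : List (List (List Int)) :=
  let numbers := PySem.List.pyRange 0 x 1
  (pvProdRep y numbers.length).map (fun assignment => pvBuildGroups y numbers assignment)

-- ===== PORT B =====
-- g[:j] + [g[j] + [i]] + g[j+1:]  (j comes from range(y) = range(len(g)), a valid index, so pyGetD is exact here)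
def pvPlace (g : List (List Int)) (j : Int) (i : Int) : List (List Int) :=
  PySem.List.slice g none (some j) ++ [PySem.List.pyGetD g j [] ++ [i]] ++ PySem.List.slice g (some (j + 1)) none

def brotForce_alt (x : Int) (y : Int) : List (List (List Int)) :=
  (PySem.List.pyRange 0 x 1).foldl
    (fun results i => results.flatMap (fun g => (PySem.List.pyRange 0 y 1).map (fun j => pvPlace g j i)))
    [List.replicate y.toNat []]

-- ===== PRECONDITION & SPEC =====
def Spec_brotForce (x : Int) (y : Int) (out : List (List (List Int))) : Prop := out = brotForce_alt x y
instance (x : Int) (y : Int) (out : List (List (List Int))) : Decidable (Spec_brotForce x y out) := by unfold Spec_brotForce; infer_instance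

-- ===== CLAIM (what is proved, stated in full; the proofs are below) =====
def Claim_equal_brotForce : Prop := ∀ (x : Int) (y : Int), Dom_brotForce x y → Spec_brotForce x y (brotForce x y)

-- ===== LEMMAS AND PROOFS =====

-- the step of B's loop, named for the proofs (definitionally B's foldl body)
def pvStep (y : Int) (results : List (List (List Int))) (i : Int) : List (List (List Int)) :=
  results.flatMap (fun g => (PySem.List.pyRange 0 y 1).map (fun j => pvPlace g j i))

lemma flatMap_singleton_id (acc : List (List (List Int))) :
    acc.flatMap (fun g => [g]) = acc := by
  induction acc with
  | nil => rfl
  | cons a as ih => simp [ih]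

-- B's loop distributes over the list of partial groupings
lemma foldl_pvStep_flatMap (y : Int) (nums : List Int) :
    ∀ acc : List (List (List Int)),
      nums.foldl (pvStep y) acc = acc.flatMap (fun g => nums.foldl (pvStep y) [g]) := by
  induction nums with
  | nil => intro acc; simp only [List.foldl_nil]; exact (flatMap_singleton_id acc).symm
  | cons n ns ih =>
    intro acc
    simp only [List.foldl_cons]
    rw [ih (pvStep y acc n)]
    show (acc.flatMap _).flatMap _ = _
    rw [List.flatMap_assoc]
    refine List.flatMap_congr (fun g _ => ?_)
    have h1 : pvStep y [g] n = (PySem.List.pyRange 0 y 1).map (fun j => pvPlace g j n) := by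
      simp [pvStep]
    rw [h1, ih ((PySem.List.pyRange 0 y 1).map (fun j => pvPlace g j n))]

lemma modify_eq_take_append (g : List (List Int)) (n : Nat) (i : Int) (h : n < g.length) :
    g.modify n (fun t => t ++ [i]) = g.take n ++ [g[n] ++ [i]] ++ g.drop (n+1) := by
  induction g generalizing n with
  | nil => simp at h
  | cons a as ih =>
    cases n with
    | zero => simp [List.modify]
    | succ m =>
      simp only [List.length_cons, Nat.add_lt_add_iff_right] at h
      have hstep : (a :: as).modify (m+1) (fun t => t ++ [i]) = a :: as.modify m (fun t => t ++ [i]) := rfl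
      rw [hstep, ih m h]
      simp

-- B's slice-splice at an in-range index is A's "append into group j"
lemma pvPlace_eq_modify (g : List (List Int)) (j i : Int)
    (h0 : 0 ≤ j) (h1 : j.toNat < g.length) :
    pvPlace g j i = g.modify j.toNat (fun t => t ++ [i]) := by
  unfold pvPlace
  rw [PySem.List.slice_to g h0, PySem.List.slice_from g (by omega : (0:Int) ≤ j + 1),
      PySem.List.pyGetD_eq_getElem (xs := g) (d := []) h0 (by omega : j < (g.length : Int))]
  rw [modify_eq_take_append g j.toNat i h1]
  have h2 : (j + 1).toNat = j.toNat + 1 := by omega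
  simp [h2]

-- loop invariant: expanding a single partial grouping g by nums enumerates
-- exactly A's groups built from g, one per assignment, in product order
lemma main_invariant (y : Int) (nums : List Int) :
    ∀ g : List (List Int), g.length = y.toNat →
      nums.foldl (pvStep y) [g]
        = (pvProdRep y nums.length).map (fun a =>
            (nums.zip a).foldl (fun groups p => groups.modify p.2.toNat (fun t => t ++ [p.1])) g) := by
  induction nums with
  | nil => intro g _; simp [pvProdRep]
  | cons n ns ih =>
    intro g hg
    simp only [List.foldl_cons]
    have h1 : pvStep y [g] n = (PySem.List.pyRange 0 y 1).map (fun j => pvPlace g j n) := by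
      simp [pvStep]
    rw [h1, foldl_pvStep_flatMap y ns, List.flatMap_map]
    show _ = (pvProdRep y (ns.length + 1)).map _
    rw [show pvProdRep y (ns.length + 1)
          = (PySem.List.pyRange 0 y 1).flatMap
              (fun v => (pvProdRep y ns.length).map (fun rest => v :: rest)) from rfl]
    rw [List.map_flatMap]
    refine List.flatMap_congr (fun j hj => ?_)
    have hjr := (PySem.List.mem_pyRange_one).1 hj
    have hjn : j.toNat < g.length := by omega
    rw [pvPlace_eq_modify g j n hjr.1 hjn]
    rw [ih (g.modify j.toNat (fun t => t ++ [n])) (by simpa using hg)]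
    rw [List.map_map]
    refine List.map_congr_left (fun rest _ => ?_)
    simp [List.zip_cons_cons]

-- ===== VERDICT (by name: the statement is the Claim_ definition above) =====
theorem brotForce_spec : Claim_equal_brotForce := by
  intro x y _
  unfold Spec_brotForce brotForce brotForce_alt pvBuildGroups
  have h := main_invariant y (PySem.List.pyRange 0 x 1) (List.replicate y.toNat []) (by simp)
  simpa [pvStep] using h.symm
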